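-- pv_equiv track=rewrite | github.com/HEEE23/programmers | 프로그래머스/1/82612. 부족한 금액 계산하기/부족한 금액 계산하기.py | solution
-- ===== SOURCE A (Python) =====
-- def solution(price, money, count):
--     answer = -1
--     result = 0
--     for i in range(1,count+1):
--         result += price*i
--     if money > result:
--         answer = 0
--     else:
--         answer = (result-money)
--     return answer
-- ===== SOURCE B (Python) =====
-- def solution(price, money, count):
--     n = count if count > 0 else 0
--     total = price * n * (n + 1) // 2
--     return 0 if money > total else total - money
-- ===== Notes on version B (the rewrite author's own statement) =====
-- stated objective: faster
-- what changed: replaces the O(count) accumulation loop by the closed-form arithmetic-series total price*n*(n+1)//2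
import Mathlib
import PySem

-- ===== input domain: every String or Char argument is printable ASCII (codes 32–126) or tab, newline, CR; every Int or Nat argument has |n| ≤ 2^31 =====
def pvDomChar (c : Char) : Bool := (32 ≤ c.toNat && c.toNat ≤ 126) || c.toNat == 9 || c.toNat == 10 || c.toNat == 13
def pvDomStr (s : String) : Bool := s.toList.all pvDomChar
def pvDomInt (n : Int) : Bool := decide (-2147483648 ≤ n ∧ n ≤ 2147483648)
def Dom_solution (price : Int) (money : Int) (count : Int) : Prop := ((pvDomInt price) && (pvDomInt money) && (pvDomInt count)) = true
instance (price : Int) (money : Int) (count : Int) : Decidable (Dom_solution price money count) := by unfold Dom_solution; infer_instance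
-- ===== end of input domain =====

-- B replaces A's O(count) accumulation loop by the closed-form series total price*n*(n+1)//2 (faster, asymptotic).
-- ===== PORT A =====
def solution (price : Int) (money : Int) (count : Int) : Int :=
  let result := (PySem.List.pyRange 1 (count + 1) 1).foldl (fun r i => r + price * i) 0
  if money > result then 0 else result - money

-- ===== PORT B =====
def solution_alt (price : Int) (money : Int) (count : Int) : Int :=
  let n := if count > 0 then count else 0
  let total := PySem.Int.floordiv (price * n * (n + 1)) 2
  if money > total then 0 else total - money

-- ===== PRECONDITION & SPEC =====
def Spec_solution (price : Int) (money : Int) (count : Int) (out : Int) : Prop := out = solution_alt price money count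
instance (price : Int) (money : Int) (count : Int) (out : Int) : Decidable (Spec_solution price money count out) := by unfold Spec_solution; infer_instance

-- ===== CLAIM (what is proved, stated in full; the proofs are below) =====
def Claim_equal_solution : Prop := ∀ (price : Int) (money : Int) (count : Int), Dom_solution price money count → Spec_solution price money count (solution price money count)

-- ===== LEMMAS AND PROOFS =====

-- ===== VERDICT (by name: the statement is the Claim_ definition above) =====
lemma sum_loop (price : Int) : ∀ (k : Nat),
    2 * ((PySem.List.pyRange 1 ((k : Int) + 1) 1).foldl (fun r i => r + price * i) 0)
      = price * (k : Int) * ((k : Int) + 1) := by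
  intro k
  induction k with
  | zero => simp [PySem.List.pyRange_one_eq_nil]
  | succ k ih =>
    have h : (1 : Int) ≤ (k : Int) + 1 := by omega
    have hr := PySem.List.pyRange_one_succ_right (a := 1) (b := (k : Int) + 1) h
    push_cast
    rw [show ((k : Int) + 1 + 1) = (((k : Int) + 1) + 1) by ring, hr, List.foldl_append]
    simp only [List.foldl]
    push_cast at ih ⊢
    linear_combination ih

lemma floordiv_two_mul (y : Int) : PySem.Int.floordiv (2 * y) 2 = y := by
  simp [PySem.Int.floordiv]

theorem solution_spec : Claim_equal_solution := by
  intro price money count _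
  unfold Spec_solution solution solution_alt
  by_cases h : count > 0
  · have hc : count = ((count.toNat : Int)) := by omega
    simp only [if_pos h]
    rw [hc]
    have h2 := sum_loop price count.toNat
    have h3 : price * (count.toNat : Int) * ((count.toNat : Int) + 1)
        = 2 * ((PySem.List.pyRange 1 ((count.toNat : Int) + 1) 1).foldl (fun r i => r + price * i) 0) := h2.symm
    rw [h3, floordiv_two_mul]
  · simp only [if_neg h]
    have he : PySem.List.pyRange 1 (count + 1) 1 = [] :=
      PySem.List.pyRange_one_eq_nil (by omega)
    rw [he]
    simp [PySem.Int.floordiv]
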